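-- pv_equiv track=rewrite | github.com/dbr360pc/product-image-automation | models/image_fetcher_service.py | _create_product_description
-- ===== SOURCE A (Python) =====
-- def _create_product_description(descriptions, product_name):
--     """Create a product description from search results"""
--     if not descriptions:
--         return ""
--
--     # Remove duplicates and clean up
--     unique_descriptions = []
--     seen = set()
--
--     for desc in descriptions:
--         # Clean up the description
--         desc = desc.strip()
--         desc = desc.replace('\n', ' ').replace('\r', '')
--
--         # Remove common prefixes/suffixes
--         for prefix in ['Buy ', 'Shop ', 'Get ', 'Find ']:
--             if desc.startswith(prefix):
--                 desc = desc[len(prefix):]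
--
--         # Skip if too short or already seen
--         if len(desc) < 30 or desc.lower() in seen:
--             continue
--
--         seen.add(desc.lower())
--         unique_descriptions.append(desc)
--
--     if not unique_descriptions:
--         return f"High-quality {product_name} available for purchase."
--
--     # Combine descriptions intelligently
--     if len(unique_descriptions) == 1:
--         return unique_descriptions[0]
--
--     # Create a comprehensive description
--     main_desc = unique_descriptions[0]
--     if len(main_desc) < 100 and len(unique_descriptions) > 1:
--         main_desc += " " + unique_descriptions[1]
--
--     # Ensure proper ending
--     if not main_desc.endswith('.'):
--         main_desc += '.'
--
--     return main_desc[:500]  # Limit length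
-- ===== SOURCE B (Python) =====
-- def _create_product_description(descriptions, product_name):
--     """Create a product description from search results.
--
--     Instead of accumulating the full deduplicated list, find only the first
--     surviving cleaned description and (if any) one more distinct one: the
--     result depends on nothing else.
--     """
--     if not descriptions:
--         return ""
--
--     def clean(d):
--         d = d.strip().replace('\n', ' ').replace('\r', '')
--         for p in ('Buy ', 'Shop ', 'Get ', 'Find '):
--             if d.startswith(p):
--                 d = d[len(p):]
--         return d
--
--     # first surviving cleaned description, and the remainder of the list
--     first = None
--     rest = []
--     for i, d in enumerate(descriptions):
--         c = clean(d)
--         if len(c) >= 30: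
--             first = c
--             rest = descriptions[i + 1:]
--             break
--
--     if first is None:
--         return f"High-quality {product_name} available for purchase."
--
--     # a second surviving description distinct (case-insensitively) from the first
--     second = next(
--         (c for c in map(clean, rest) if len(c) >= 30 and c.lower() != first.lower()),
--         None,
--     )
--
--     if second is None:
--         return first
--
--     main = first if len(first) >= 100 else first + " " + second
--     if not main.endswith('.'):
--         main += '.'
--     return main[:500]
-- ===== Notes on version B (the rewrite author's own statement) =====
-- stated objective: simpler
-- what changed: Instead of A's full pass building the deduplicated list plus a seen set, B searches for only the first surviving cleaned description and then for one more case-insensitively distinct one (stopping early), since the result depends on nothing else; no set and no accumulated list are maintained.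
import Mathlib
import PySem

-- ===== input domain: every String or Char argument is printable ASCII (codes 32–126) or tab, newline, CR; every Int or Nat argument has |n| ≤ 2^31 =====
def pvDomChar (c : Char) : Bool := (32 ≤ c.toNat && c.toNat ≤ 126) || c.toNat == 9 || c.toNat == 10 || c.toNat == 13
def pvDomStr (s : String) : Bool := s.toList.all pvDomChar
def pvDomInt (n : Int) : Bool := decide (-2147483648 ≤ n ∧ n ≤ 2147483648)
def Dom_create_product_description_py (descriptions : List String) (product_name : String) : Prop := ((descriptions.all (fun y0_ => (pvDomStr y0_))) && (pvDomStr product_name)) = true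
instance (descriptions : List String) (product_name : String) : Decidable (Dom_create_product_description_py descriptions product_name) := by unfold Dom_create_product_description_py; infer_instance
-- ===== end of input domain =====

-- B changes the decomposition: instead of A's full dedup pass (list + seen set over all
-- descriptions), B searches for just the first surviving cleaned description and one more
-- distinct one — the only data the result depends on. Objective: simpler (no set, early exit).

-- ===== PORT A =====
-- clean-up of one description (strip, newline/CR replace, sequential prefix removal)
def pvCleanA (desc : String) : String :=
  let d := PySem.Str.strip desc
  let d := PySem.Str.replace d "\n" " "
  let d := PySem.Str.replace d "\r" ""
  (["Buy ", "Shop ", "Get ", "Find "]).foldl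
    (fun d p => if PySem.Str.startswith d p then PySem.Str.slice d (some (PySem.Str.len p)) none else d) d

def create_product_description_py (descriptions : List String) (product_name : String) : String :=
  if descriptions = [] then "" else
  -- for desc in descriptions: clean, skip if short or seen, else append and record
  let st := descriptions.foldl
    (fun (st : List String × PySem.Set String) desc =>
      let d := pvCleanA desc
      if PySem.Str.len d < 30 ∨ PySem.Set.contains st.2 (PySem.Str.lower d) = true then st
      else (st.1 ++ [d], PySem.Set.add st.2 (PySem.Str.lower d)))
    ([], PySem.Set.empty)
  let uniq := st.1
  match uniq with
  | [] => PySem.Str.join "" ["High-quality ", product_name, " available for purchase."]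
  | [u] => u
  | u0 :: u1 :: _ =>
    let main := if PySem.Str.len u0 < 100 ∧ 1 < PySem.List.len uniq
                then PySem.Str.join "" [u0, " ", u1] else u0
    let main := if ¬ PySem.Str.endswith main "." = true then PySem.Str.join "" [main, "."] else main
    PySem.Str.slice main none (some 500)

-- ===== PORT B =====
-- Source B's local `clean` is character-for-character the cleaning above; ported as the same helper
-- Source B's first loop: first surviving cleaned description and the remainder of the list
def pvFindFirst : List String → Option (String × List String)
  | [] => none
  | d :: rest =>
    let c := pvCleanA d
    if 30 ≤ PySem.Str.len c then some (c, rest) else pvFindFirst rest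

-- Source B's `next(...)`: first surviving cleaned description distinct from `first`
def pvFindSecond (first : String) : List String → Option String
  | [] => none
  | d :: rest =>
    let c := pvCleanA d
    if 30 ≤ PySem.Str.len c ∧ PySem.Str.lower c ≠ PySem.Str.lower first
    then some c else pvFindSecond first rest

def create_product_description_py_alt (descriptions : List String) (product_name : String) : String :=
  if descriptions = [] then "" else
  match pvFindFirst descriptions with
  | none => PySem.Str.join "" ["High-quality ", product_name, " available for purchase."]
  | some (first, rest) =>
    match pvFindSecond first rest with
    | none => first
    | some second =>
      let main := if 100 ≤ PySem.Str.len first then first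
                  else PySem.Str.join "" [first, " ", second]
      let main := if ¬ PySem.Str.endswith main "." = true then PySem.Str.join "" [main, "."] else main
      PySem.Str.slice main none (some 500)

-- ===== PRECONDITION & SPEC =====
def Spec_create_product_description_py (descriptions : List String) (product_name : String) (out : String) : Prop := out = create_product_description_py_alt descriptions product_name
instance (descriptions : List String) (product_name : String) (out : String) : Decidable (Spec_create_product_description_py descriptions product_name out) := by unfold Spec_create_product_description_py; infer_instance

-- ===== CLAIM (what is proved, stated in full; the proofs are below) =====
def Claim_equal_create_product_description_py : Prop := ∀ (descriptions : List String) (product_name : String), Dom_create_product_description_py descriptions product_name → Spec_create_product_description_py descriptions product_name (create_product_description_py descriptions product_name)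

-- ===== LEMMAS AND PROOFS =====

-- the list A's loop appends when started with seen-set s
def pvKept (s : PySem.Set String) : List String → List String
  | [] => []
  | d :: l =>
    let c := pvCleanA d
    if PySem.Str.len c < 30 ∨ PySem.Set.contains s (PySem.Str.lower c) = true
    then pvKept s l
    else c :: pvKept (PySem.Set.add s (PySem.Str.lower c)) l

theorem pvFold_eq (l : List String) : ∀ (uniq : List String) (s : PySem.Set String),
    (l.foldl (fun (st : List String × PySem.Set String) desc =>
      let d := pvCleanA desc
      if PySem.Str.len d < 30 ∨ PySem.Set.contains st.2 (PySem.Str.lower d) = true then st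
      else (st.1 ++ [d], PySem.Set.add st.2 (PySem.Str.lower d))) (uniq, s)).1
      = uniq ++ pvKept s l := by
  induction l with
  | nil => intro uniq s; simp only [List.foldl_nil, pvKept, List.append_nil]
  | cons d l ih =>
    intro uniq s
    simp only [List.foldl_cons, pvKept]
    by_cases h : PySem.Str.len (pvCleanA d) < 30 ∨
        PySem.Set.contains s (PySem.Str.lower (pvCleanA d)) = true
    · rw [if_pos h, if_pos h, ih]
    · rw [if_neg h, if_neg h, ih, List.append_assoc, List.singleton_append]

theorem pvKept_empty (l : List String) :
    pvKept PySem.Set.empty l =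
      (match pvFindFirst l with
       | none => []
       | some (f, r) => f :: pvKept [PySem.Str.lower f] r) := by
  induction l with
  | nil => rfl
  | cons d l ih =>
    simp only [pvKept, pvFindFirst]
    by_cases h : PySem.Str.len (pvCleanA d) < 30
    · rw [if_pos (Or.inl h), if_neg (by omega : ¬ (30 : Int) ≤ PySem.Str.len (pvCleanA d)), ih]
    · have hcond : ¬ (PySem.Str.len (pvCleanA d) < 30 ∨
          PySem.Set.contains PySem.Set.empty (PySem.Str.lower (pvCleanA d)) = true) := by
        rintro (hlt | hct)
        · exact h hlt
        · exact Bool.false_ne_true hct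
      rw [if_neg hcond, if_pos (by omega : (30 : Int) ≤ PySem.Str.len (pvCleanA d))]
      rfl

theorem pvKept_head (f : String) (l : List String) :
    (pvKept [PySem.Str.lower f] l).head? = pvFindSecond f l := by
  induction l with
  | nil => rfl
  | cons d l ih =>
    simp only [pvKept, pvFindSecond]
    have hmem : PySem.Set.contains [PySem.Str.lower f] (PySem.Str.lower (pvCleanA d)) = true ↔
        PySem.Str.lower (pvCleanA d) = PySem.Str.lower f := by
      rw [PySem.Set.contains_iff]; simp
    by_cases h1 : PySem.Str.len (pvCleanA d) < 30
    · rw [if_pos (Or.inl h1), ih,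
        if_neg (by rintro ⟨h30, -⟩; omega)]
    · by_cases h2 : PySem.Str.lower (pvCleanA d) = PySem.Str.lower f
      · rw [if_pos (Or.inr (hmem.mpr h2)), ih, if_neg (by rintro ⟨-, hne⟩; exact hne h2)]
      · rw [if_neg (by rintro (hlt | hct); exact h1 hlt; exact h2 (hmem.mp hct)),
          if_pos ⟨by omega, h2⟩]
        rfl

-- ===== VERDICT (by name: the statement is the Claim_ definition above) =====
theorem create_product_description_py_spec : Claim_equal_create_product_description_py := by
  intro descriptions product_name _
  simp only [Spec_create_product_description_py, create_product_description_py,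
    create_product_description_py_alt]
  by_cases hnil : descriptions = []
  · rw [if_pos hnil, if_pos hnil]
  · rw [if_neg hnil, if_neg hnil,
      pvFold_eq descriptions [] PySem.Set.empty, List.nil_append, pvKept_empty]
    cases hf : pvFindFirst descriptions with
    | none => rfl
    | some p =>
      obtain ⟨f, r⟩ := p
      dsimp only
      cases hs : pvFindSecond f r with
      | none =>
        have ht : pvKept [PySem.Str.lower f] r = [] :=
          List.head?_eq_none_iff.mp (by rw [pvKept_head, hs])
        simp only [ht]
      | some c2 =>
        have hh : (pvKept [PySem.Str.lower f] r).head? = some c2 := by rw [pvKept_head, hs]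
        obtain ⟨t, ht⟩ := List.head?_eq_some_iff.mp hh
        simp only [ht]
        have hlen : 1 < PySem.List.len (f :: c2 :: t) := by
          simp only [PySem.List.len_eq, List.length_cons]; omega
        by_cases h100 : PySem.Str.len f < 100
        · have hA : PySem.Str.len f < 100 ∧ 1 < PySem.List.len (f :: c2 :: t) := ⟨h100, hlen⟩
          simp only [if_pos hA, if_neg (show ¬ (100 : Int) ≤ PySem.Str.len f by omega)]
        · have hA : ¬ (PySem.Str.len f < 100 ∧ 1 < PySem.List.len (f :: c2 :: t)) :=
            fun hc => h100 hc.1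
          simp only [if_neg hA, if_pos (show (100 : Int) ≤ PySem.Str.len f by omega)]
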